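/-
  A PURE MODEL OF jsmn, SHAPED LIKE THE C   (jsmn.h by Serge Zaitsev, MIT; proofs/c6/jsmn.c, sha256 c04533e9…14fb)

  One Lean function per C function, the same state (the three fields of `jsmn_parser`, the token array, `count`), the same control flow,
  the same order of reads and writes. Both compile-time switches are parameters (`Config`): JSMN_STRICT and JSMN_PARENT_LINKS.

  HOW C's TYPES ARE RENDERED.  `unsigned int` values (pos, toknext) are `Nat`s below 2^32; where C's arithmetic wraps the model wraps
  (`u32`). `int` values (toksuper, a token's start / end / size / parent, count, the result) are `Int`s in [-2^31, 2^31); a conversion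
  from unsigned to int, and every `++` on an int, goes through `i32` (gcc's behaviour: wrap). `size_t len` is the length of `js`.
  `char` is signed on x86, but no comparison in jsmn.h can tell: every test `c < 32 || c >= 127`, `c >= 48 && c <= 57` … gives the same
  answer for a byte 80H … FFH read as negative or as 128 … 255. Bytes are `UInt8`.
  `tokens == NULL` (jsmn's counting mode) is `toks = none`.

  LOOPS.  The three `for (; parser->pos < len && js[parser->pos] != '\0'; parser->pos++)` loops take a `fuel` argument and answer `none`
  when it runs out: `pos` is an `unsigned int` compared with a `size_t len`, so only for `len < 2^32` is the test sure to become false.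
  `Json/Jsmn/Total.lean` proves that `js.length + 1` is always enough when `js.length < 2^32`. The walk up the parent links (`closeLinks`)
  takes fuel too: it ends because, under the precondition `Inv`, every link points to an earlier token.

  A token access outside the list (`getD` / `set` beyond the end) reads `default` / writes nothing: the model says nothing faithful about
  an out-of-bounds access; `Json/Jsmn/Safe.lean` proves that under the precondition `Inv` none happens.
-/
namespace Jsmn

/-- The two compile-time switches of jsmn.h. -/
structure Config where
  strict : Bool
  parentLinks : Bool
deriving DecidableEq, Repr

/-- The default build: neither switch. -/
def Config.default : Config := ⟨false, false⟩
/-- `-DJSMN_STRICT -DJSMN_PARENT_LINKS`. -/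
def Config.strictLinks : Config := ⟨true, true⟩

/-- `jsmntok_t`. `type`: 0 undefined, 1 object, 2 array, 4 string, 8 primitive. `parent` exists only with JSMN_PARENT_LINKS (the model
carries it always and never touches it without). -/
structure Token where
  type : Nat
  start : Int
  «end» : Int
  size : Int
  parent : Int
deriving DecidableEq, Repr, Inhabited

/-- `jsmn_parser`. -/
structure Parser where
  pos : Nat
  toknext : Nat
  toksuper : Int
deriving DecidableEq, Repr, Inhabited

/-- `jsmn_init`. -/
def Parser.init : Parser := ⟨0, 0, -1⟩

/-- The value of an `unsigned int` expression: modulo 2^32. -/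
def u32 (x : Int) : Nat := (x % 4294967296).toNat
/-- The value of an `int` expression / a conversion to `int`: wrapped into [-2^31, 2^31). -/
def i32 (x : Int) : Int := (x + 2147483648) % 4294967296 - 2147483648

def JSMN_OBJECT : Nat := 1
def JSMN_ARRAY : Nat := 2
def JSMN_STRING : Nat := 4
def JSMN_PRIMITIVE : Nat := 8
def JSMN_ERROR_NOMEM : Int := -1
def JSMN_ERROR_INVAL : Int := -2
def JSMN_ERROR_PART : Int := -3

abbrev Tokens := List Token

/-- `tokens[i]` for an `int` index (a negative index, like one beyond the end, reads `default`: see the header). -/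
def tokAt (ts : Tokens) (i : Int) : Token := if i < 0 then default else ts.getD i.toNat default
/-- `tokens[i] = f (tokens[i])` for an `int` index (a negative index, like one beyond the end, writes nothing). -/
def tokUpd (ts : Tokens) (i : Int) (f : Token → Token) : Tokens := if i < 0 then ts else ts.set i.toNat (f (tokAt ts i))

/-- `js[pos]`. -/
def charAt (js : List UInt8) (pos : Nat) : UInt8 := js.getD pos 0

/-- The loop test `parser->pos < len && js[parser->pos] != '\0'`. -/
def more (js : List UInt8) (pos : Nat) : Bool := decide (pos < js.length) && charAt js pos != 0

/-- `token->start != -1 && token->end == -1`: an object or array that has been opened and not yet closed. -/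
def Token.isOpen (t : Token) : Bool := t.start != -1 && t.«end» == -1

/-! ### jsmn_alloc_token, jsmn_fill_token -/

/-- `jsmn_alloc_token`: `none` = NULL (no room); otherwise the index of the fresh token, `toknext` advanced, start = end = -1, size = 0
(and parent = -1 with parent links). The token's `type` is NOT touched. -/
def allocToken (cfg : Config) (p : Parser) (ts : Tokens) (numTokens : Nat) : Option (Nat × Parser × Tokens) :=
  if p.toknext ≥ numTokens then none
  else
    let i := p.toknext
    let t := ts.getD i default
    some (i, { p with toknext := u32 (p.toknext + 1) },
      ts.set i { t with start := -1, «end» := -1, size := 0, parent := if cfg.parentLinks then -1 else t.parent })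

/-- `jsmn_fill_token`. -/
def fillToken (t : Token) (type : Nat) (start «end» : Int) : Token := { t with type := type, start := start, «end» := «end», size := 0 }

/-! ### jsmn_parse_primitive -/

/-- The characters at which a primitive stops (the `switch` of jsmn_parse_primitive): tab, CR, LF, space, `,` `]` `}`, and — not in
strict mode — `:`. -/
def primStop (cfg : Config) (c : UInt8) : Bool :=
  (!cfg.strict && c == 0x3a) || c == 0x09 || c == 0x0d || c == 0x0a || c == 0x20 || c == 0x2c || c == 0x5d || c == 0x7d

/-- How the scanning loop of jsmn_parse_primitive ends. -/
inductive PrimScan where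
  /-- `goto found` at a stop character, at this position -/
  | found (pos : Nat)
  /-- a character below 32 or above 126: JSMN_ERROR_INVAL -/
  | bad
  /-- the loop test failed (end of input or a NUL) at this position -/
  | eoi (pos : Nat)
deriving DecidableEq, Repr

/-- The `for` loop of jsmn_parse_primitive from position `pos`. -/
def primScan (cfg : Config) (js : List UInt8) : (fuel : Nat) → (pos : Nat) → Option PrimScan
  | 0, _ => none
  | fuel + 1, pos =>
    if more js pos then
      let c := charAt js pos
      if primStop cfg c then some (.found pos)
      else if c.toNat < 32 || c.toNat ≥ 127 then some .bad
      else primScan cfg js fuel (u32 (pos + 1))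
    else some (.eoi pos)

/-- `jsmn_parse_primitive`: the result `r`, the parser and the tokens afterwards. -/
def parsePrimitive (cfg : Config) (js : List UInt8) (fuel : Nat) (p : Parser) (toks : Option Tokens) (numTokens : Nat) :
    Option (Int × Parser × Option Tokens) :=
  let start := p.pos
  let found (q : Nat) : Int × Parser × Option Tokens :=
    match toks with
    | none => (0, { p with pos := u32 (q - 1) }, none)
    | some ts =>
      match allocToken cfg { p with pos := q } ts numTokens with
      | none => (JSMN_ERROR_NOMEM, { p with pos := start }, some ts)
      | some (i, p', ts') =>
        let ts' := ts'.set i (fillToken (ts'.getD i default) JSMN_PRIMITIVE (i32 start) (i32 q))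
        let ts' := if cfg.parentLinks then ts'.set i { ts'.getD i default with parent := p.toksuper } else ts'
        (0, { p' with pos := u32 (q - 1) }, some ts')
  match primScan cfg js fuel p.pos with
  | none => none
  | some .bad => some (JSMN_ERROR_INVAL, { p with pos := start }, toks)
  | some (.eoi q) => if cfg.strict then some (JSMN_ERROR_PART, { p with pos := start }, toks) else some (found q)
  | some (.found q) => some (found q)

/-! ### jsmn_parse_string -/

/-- `0-9`, `A-F`, `a-f`. -/
def isHex (c : UInt8) : Bool := (48 ≤ c.toNat && c.toNat ≤ 57) || (65 ≤ c.toNat && c.toNat ≤ 70) || (97 ≤ c.toNat && c.toNat ≤ 102)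

/-- The characters allowed after a backslash other than `u`: `"` `/` `\` `b` `f` `r` `n` `t`. -/
def isSimpleEscape (c : UInt8) : Bool :=
  c == 0x22 || c == 0x2f || c == 0x5c || c == 0x62 || c == 0x66 || c == 0x72 || c == 0x6e || c == 0x74

/-- The inner loop after `\u`: at most `k` more hex digits, stopping early at the end of the input or at a NUL (jsmn does NOT insist on
four digits there). `none`: a character that is not a hex digit (JSMN_ERROR_INVAL); otherwise the position after the digits. -/
def hexScan (js : List UInt8) : (k : Nat) → (pos : Nat) → Option Nat
  | 0, pos => some pos
  | k + 1, pos =>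
    if more js pos then
      if isHex (charAt js pos) then hexScan js k (u32 (pos + 1)) else none
    else some pos

/-- How the scanning loop of jsmn_parse_string ends. -/
inductive StrScan where
  /-- the closing quote, at this position -/
  | quote (pos : Nat)
  /-- a bad escape: JSMN_ERROR_INVAL -/
  | bad
  /-- the loop test failed: JSMN_ERROR_PART -/
  | eoi
deriving DecidableEq, Repr

/-- The `for` loop of jsmn_parse_string from position `pos` (already past the opening quote). -/
def strScan (js : List UInt8) : (fuel : Nat) → (pos : Nat) → Option StrScan
  | 0, _ => none
  | fuel + 1, pos =>
    if more js pos then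
      let c := charAt js pos
      if c == 0x22 then some (.quote pos)
      else if c == 0x5c && decide (u32 (pos + 1) < js.length) then
        let pos := u32 (pos + 1)
        let e := charAt js pos
        if isSimpleEscape e then strScan js fuel (u32 (pos + 1))
        else if e == 0x75 then
          match hexScan js 4 (u32 (pos + 1)) with
          | none => some .bad
          | some q => strScan js fuel (u32 (u32 (q - 1) + 1))
        else some .bad
      else strScan js fuel (u32 (pos + 1))
    else some .eoi

/-- `jsmn_parse_string`. -/
def parseString (cfg : Config) (js : List UInt8) (fuel : Nat) (p : Parser) (toks : Option Tokens) (numTokens : Nat) :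
    Option (Int × Parser × Option Tokens) :=
  let start := p.pos
  match strScan js fuel (u32 (p.pos + 1)) with
  | none => none
  | some .bad => some (JSMN_ERROR_INVAL, { p with pos := start }, toks)
  | some .eoi => some (JSMN_ERROR_PART, { p with pos := start }, toks)
  | some (.quote q) =>
    match toks with
    | none => some (0, { p with pos := q }, none)
    | some ts =>
      match allocToken cfg { p with pos := q } ts numTokens with
      | none => some (JSMN_ERROR_NOMEM, { p with pos := start }, some ts)
      | some (i, p', ts') =>
        let ts' := ts'.set i (fillToken (ts'.getD i default) JSMN_STRING (i32 (i32 start + 1)) (i32 q))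
        let ts' := if cfg.parentLinks then ts'.set i { ts'.getD i default with parent := p.toksuper } else ts'
        some (0, p', some ts')

/-! ### jsmn_parse -/

/-- The state of jsmn_parse's main loop. -/
structure St where
  p : Parser
  toks : Option Tokens
  count : Int
deriving Repr

/-- One trip through the body of the main loop: go on, or `return r`. -/
inductive Step where
  | next (s : St)
  | ret (r : Int) (s : St)

/-- `for (i = n - 1; i >= 0; i--) if (tokens[i] is open) …`: the largest index below `n` whose token is open. -/
def scanOpen (ts : Tokens) : (n : Nat) → Option Nat
  | 0 => none
  | n + 1 => if (ts.getD n default).isOpen then some n else scanOpen ts n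

/-- The same scan, restricted to objects and arrays (the `,` case without parent links). -/
def scanOpenContainer (ts : Tokens) : (n : Nat) → Option Nat
  | 0 => none
  | n + 1 =>
    let t := ts.getD n default
    if (t.type == JSMN_ARRAY || t.type == JSMN_OBJECT) && t.isOpen then some n else scanOpenContainer ts n

/-- `tokens[parser->toksuper].size++` when there is a superior token and a token array (after a string or a primitive). -/
def bumpSuper (p : Parser) (toks : Option Tokens) : Option Tokens :=
  match toks with
  | none => none
  | some ts => if p.toksuper != -1 then some (tokUpd ts p.toksuper fun t => { t with size := i32 (t.size + 1) }) else some ts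

/-- `case '{': case '[':`. -/
def openBracket (cfg : Config) (c : UInt8) (numTokens : Nat) (s : St) : Step :=
  let count := i32 (s.count + 1)
  match s.toks with
  | none => .next { s with count := count }
  | some ts =>
    match allocToken cfg s.p ts numTokens with
    | none => .ret JSMN_ERROR_NOMEM { s with count := count }
    | some (i, p, ts) =>
      let link (ts : Tokens) : Tokens :=
        let ts := tokUpd ts p.toksuper fun t => { t with size := i32 (t.size + 1) }
        if cfg.parentLinks then ts.set i { ts.getD i default with parent := p.toksuper } else ts
      let fin (ts : Tokens) : Step :=
        let ts := ts.set i { ts.getD i default with type := if c == 0x7b then JSMN_OBJECT else JSMN_ARRAY, start := i32 p.pos }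
        .next ⟨{ p with toksuper := i32 (p.toknext - 1) }, some ts, count⟩
      if p.toksuper != -1 then
        if cfg.strict && (tokAt ts p.toksuper).type == JSMN_OBJECT then .ret JSMN_ERROR_INVAL ⟨p, some ts, count⟩
        else fin (link ts)
      else fin ts

/-- `case '}': case ']':` WITHOUT parent links: two backward scans. -/
def closeScan (type : Nat) (s : St) (ts : Tokens) : Step :=
  let i := i32 (s.p.toknext - 1)
  if i < -1 then .next s     -- more than 2^31 tokens: `i` is negative, both loops are skipped
  else
    match scanOpen ts (i + 1).toNat with
    | none => .ret JSMN_ERROR_INVAL s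
    | some j =>
      if (ts.getD j default).type != type then .ret JSMN_ERROR_INVAL s
      else
        let ts := ts.set j { ts.getD j default with «end» := i32 (s.p.pos + 1) }
        match scanOpen ts (j + 1) with
        | none => .next { s with p := { s.p with toksuper := -1 }, toks := some ts }
        | some k => .next { s with p := { s.p with toksuper := k }, toks := some ts }

/-- The `for (;;)` of `case '}': case ']':` WITH parent links, from token index `idx`: walk up the parent links to the first open token. -/
def closeLinks (type : Nat) (s : St) (ts : Tokens) : (fuel : Nat) → (idx : Int) → Option Step
  | 0, _ => none
  | fuel + 1, idx =>
    let t := tokAt ts idx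
    if t.isOpen then
      if t.type != type then some (.ret JSMN_ERROR_INVAL s)
      else
        let ts := tokUpd ts idx fun t => { t with «end» := i32 (s.p.pos + 1) }
        some (.next { s with p := { s.p with toksuper := t.parent }, toks := some ts })
    else if t.parent == -1 then
      if t.type != type || s.p.toksuper == -1 then some (.ret JSMN_ERROR_INVAL s) else some (.next s)
    else closeLinks type s ts fuel t.parent

/-- `case '}': case ']':`. -/
def closeBracket (cfg : Config) (c : UInt8) (s : St) : Option Step :=
  match s.toks with
  | none => some (.next s)
  | some ts =>
    let type := if c == 0x7d then JSMN_OBJECT else JSMN_ARRAY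
    if cfg.parentLinks then
      if s.p.toknext < 1 then some (.ret JSMN_ERROR_INVAL s)
      else closeLinks type s ts (s.p.toknext + 1) (s.p.toknext - 1 : Nat)
    else some (closeScan type s ts)

/-- `case ',':`. -/
def comma (cfg : Config) (s : St) : Step :=
  match s.toks with
  | none => .next s
  | some ts =>
    if s.p.toksuper != -1 && (tokAt ts s.p.toksuper).type != JSMN_ARRAY && (tokAt ts s.p.toksuper).type != JSMN_OBJECT then
      if cfg.parentLinks then .next { s with p := { s.p with toksuper := (tokAt ts s.p.toksuper).parent } }
      else
        let i := i32 (s.p.toknext - 1)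
        if i < 0 then .next s
        else
          match scanOpenContainer ts (i + 1).toNat with
          | none => .next s
          | some j => .next { s with p := { s.p with toksuper := j } }
    else .next s

/-- The call of jsmn_parse_primitive and what follows it in jsmn_parse. -/
def primitiveCase (cfg : Config) (js : List UInt8) (fuel : Nat) (numTokens : Nat) (s : St) : Option Step :=
  match parsePrimitive cfg js fuel s.p s.toks numTokens with
  | none => none
  | some (r, p, toks) =>
    if r < 0 then some (.ret r ⟨p, toks, s.count⟩)
    else some (.next ⟨p, bumpSuper p toks, i32 (s.count + 1)⟩)

/-- In strict mode a primitive may start only with `-`, a digit, `t`, `f` or `n`. -/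
def primStart (c : UInt8) : Bool := c == 0x2d || (0x30 ≤ c.toNat && c.toNat ≤ 0x39) || c == 0x74 || c == 0x66 || c == 0x6e

/-- The body of the main loop of jsmn_parse for the character `c = js[parser->pos]` (the `switch`). -/
def body (cfg : Config) (js : List UInt8) (fuel : Nat) (numTokens : Nat) (s : St) (c : UInt8) : Option Step :=
  if c == 0x7b || c == 0x5b then some (openBracket cfg c numTokens s)
  else if c == 0x7d || c == 0x5d then closeBracket cfg c s
  else if c == 0x22 then
    match parseString cfg js fuel s.p s.toks numTokens with
    | none => none
    | some (r, p, toks) =>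
      if r < 0 then some (.ret r ⟨p, toks, s.count⟩)
      else some (.next ⟨p, bumpSuper p toks, i32 (s.count + 1)⟩)
  else if c == 0x09 || c == 0x0d || c == 0x0a || c == 0x20 then some (.next s)
  else if c == 0x3a then some (.next { s with p := { s.p with toksuper := i32 (s.p.toknext - 1) } })
  else if c == 0x2c then some (comma cfg s)
  else if cfg.strict then
    if primStart c then
      let forbidden : Bool :=
        match s.toks with
        | none => false
        | some ts =>
          s.p.toksuper != -1 &&
            ((tokAt ts s.p.toksuper).type == JSMN_OBJECT ||
              ((tokAt ts s.p.toksuper).type == JSMN_STRING && (tokAt ts s.p.toksuper).size != 0))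
      if forbidden then some (.ret JSMN_ERROR_INVAL s) else primitiveCase cfg js fuel numTokens s
    else some (.ret JSMN_ERROR_INVAL s)
  else primitiveCase cfg js fuel numTokens s

/-- After the main loop: JSMN_ERROR_PART if some object or array is still open, else `count`. -/
def finish (s : St) : Int :=
  match s.toks with
  | none => s.count
  | some ts =>
    let i := i32 (s.p.toknext - 1)
    if i < 0 then s.count
    else match scanOpen ts (i + 1).toNat with
      | some _ => JSMN_ERROR_PART
      | none => s.count

/-- The main loop of jsmn_parse. -/
def loop (cfg : Config) (js : List UInt8) (numTokens : Nat) : (fuel : Nat) → St → Option (Int × St)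
  | 0, _ => none
  | fuel + 1, s =>
    if more js s.p.pos then
      match body cfg js (fuel + 1) numTokens s (charAt js s.p.pos) with
      | none => none
      | some (.ret r s') => some (r, s')
      | some (.next s') => loop cfg js numTokens fuel { s' with p := { s'.p with pos := u32 (s'.p.pos + 1) } }
    else some (finish s, s)

/-- `jsmn_parse` with an explicit amount of fuel: the result, the parser and the tokens afterwards. -/
def parseFuel (cfg : Config) (fuel : Nat) (js : List UInt8) (p : Parser) (toks : Option Tokens) (numTokens : Nat) :
    Option (Int × Parser × Option Tokens) :=
  (loop cfg js numTokens fuel ⟨p, toks, i32 p.toknext⟩).map fun (r, s) => (r, s.p, s.toks)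

/-- **`jsmn_parse(&p, js, js.length, toks, numTokens)`**: the result, the parser and the tokens afterwards. `none` only if the loops did
not finish within `js.length + 1` rounds, which never happens for `js.length < 2^32` (`Json/Jsmn/Total.lean`). -/
def parse (cfg : Config) (js : List UInt8) (p : Parser) (toks : Option Tokens) (numTokens : Nat) : Option (Int × Parser × Option Tokens) :=
  parseFuel cfg (js.length + 1) js p toks numTokens

/-- `jsmn_run` of proofs/c6/shim.c: jsmn_init, then one jsmn_parse. -/
def run (cfg : Config) (js : List UInt8) (toks : Option Tokens) (numTokens : Nat) : Option (Int × Option Tokens) :=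
  (parse cfg js Parser.init toks numTokens).map fun (r, _, toks) => (r, toks)

end Jsmn
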